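-- pv_equiv track=rewrite | github.com/JangHyoSeong/codingTest | Baekjoon/18869_멀티버스 2/source.py | count_uniform_universes
-- ===== SOURCE A (Python) =====
-- from collections import defaultdict
--
-- def count_uniform_universes(M, N, universes):
--     # 좌표 압축을 통해 각 우주의 순위 배열을 계산
--     def compress(universe):
--         sorted_uni = sorted(set(universe))
--         rank_map = {value: rank for rank, value in enumerate(sorted_uni)}
--         return tuple(rank_map[value] for value in universe)
--
--     # 모든 우주를 압축된 순위 배열로 변환
--     compressed_universes = [compress(universe) for universe in universes]
--
--     # 순위 배열을 카운팅하여 균등한 쌍 계산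
--     freq = defaultdict(int)
--     for compressed in compressed_universes:
--         freq[compressed] += 1
--
--     # 같은 순위 배열이 나타난 횟수로 균등한 쌍의 개수를 계산
--     result = 0
--     for count in freq.values():
--         if count > 1:
--             result += count * (count - 1) // 2  # 조합 계산
--
--     return result
-- ===== SOURCE B (Python) =====
-- def count_uniform_universes(M, N, universes):
--     # Brute force, no hashing and no sorting: the rank of a value is the number of
--     # DISTINCT smaller values in its universe; each universe is compared with every
--     # earlier one and equal rank patterns contribute one pair.
--     def compress(universe):
--         dv = set(universe)
--         return tuple(sum(1 for w in dv if w < v) for v in universe)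
--
--     result = 0
--     seen = []
--     for u in universes:
--         c = compress(u)
--         for p in seen:
--             if p == c:
--                 result += 1
--         seen.append(c)
--     return result
-- ===== Notes on version B (the rewrite author's own statement) =====
-- stated objective: alternative
-- what changed: B drops both the sort and the frequency dict: it computes each rank directly as the number of distinct smaller values in the universe (a comparison count instead of sorted(set)+rank dict), and counts pairs by comparing every universe's rank pattern against all previously seen patterns in a nested scan instead of hashing frequencies and summing count*(count-1)//2.
import Mathlib
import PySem

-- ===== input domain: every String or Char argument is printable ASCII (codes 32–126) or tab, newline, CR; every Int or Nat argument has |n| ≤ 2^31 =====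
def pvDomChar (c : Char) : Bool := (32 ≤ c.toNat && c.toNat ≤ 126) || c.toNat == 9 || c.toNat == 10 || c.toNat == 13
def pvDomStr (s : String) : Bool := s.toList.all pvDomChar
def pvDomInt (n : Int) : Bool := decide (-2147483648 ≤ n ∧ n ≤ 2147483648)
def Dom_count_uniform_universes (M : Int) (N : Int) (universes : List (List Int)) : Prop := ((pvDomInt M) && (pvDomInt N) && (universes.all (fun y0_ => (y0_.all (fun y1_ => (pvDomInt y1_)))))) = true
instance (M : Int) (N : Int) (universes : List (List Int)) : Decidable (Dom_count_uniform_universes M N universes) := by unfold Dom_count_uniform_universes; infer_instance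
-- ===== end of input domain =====

-- B replaces A's sort+rank-dict compression by counting distinct smaller values, and A's
-- frequency-dict counting by a nested scan against all earlier rank patterns (alternative).

-- ===== PORT A =====
-- A's inner 'compress': sorted(set(universe)), rank dict from enumerate, then lookup.
-- rank_map[value]: value always is a key (it comes from universe ⊆ sorted(set(universe))),
-- so the KeyError branch is unreachable and getD 0 is exact here.
def pvCompressA (uni : List Int) : List Int :=
  let sortedUni := PySem.List.sorted (PySem.Set.ofList uni) (fun x => x) false
  let rankMap : PySem.Dict Int Int :=
    (PySem.List.enumerate sortedUni 0).foldl (fun d p => d.insert p.2 p.1) PySem.Dict.empty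
  uni.map (fun value => rankMap.getD value 0)

def count_uniform_universes (M : Int) (N : Int) (universes : List (List Int)) : Int :=
  let compressedUniverses := universes.map pvCompressA
  -- freq = defaultdict(int); for compressed in ...: freq[compressed] += 1
  let freq : PySem.Dict (List Int) Int :=
    compressedUniverses.foldl (fun d compressed => d.modify compressed 0 (· + 1)) PySem.Dict.empty
  -- for count in freq.values(): if count > 1: result += count * (count - 1) // 2
  freq.values.foldl
    (fun result count =>
      if count > 1 then result + PySem.Int.floordiv (count * (count - 1)) 2 else result) 0

-- ===== PORT B =====
-- B's 'compress': rank of v = number of distinct smaller values (sum over the set).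
def pvCompressB (uni : List Int) : List Int :=
  let dv := PySem.Set.ofList uni
  uni.map (fun v => dv.foldl (fun (acc : Int) w => if w < v then acc + 1 else acc) 0)

def count_uniform_universes_alt (M : Int) (N : Int) (universes : List (List Int)) : Int :=
  -- result = 0; seen = []; for u: c = compress(u); for p in seen: if p == c: result += 1; seen.append(c)
  (universes.foldl
    (fun (s : Int × List (List Int)) u =>
      let c := pvCompressB u
      let r := s.2.foldl (fun (r : Int) p => if p = c then r + 1 else r) s.1
      (r, s.2 ++ [c]))
    ((0 : Int), ([] : List (List Int)))).1

-- ===== PRECONDITION & SPEC =====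
def Spec_count_uniform_universes (M : Int) (N : Int) (universes : List (List Int)) (out : Int) : Prop := out = count_uniform_universes_alt M N universes
instance (M : Int) (N : Int) (universes : List (List Int)) (out : Int) : Decidable (Spec_count_uniform_universes M N universes out) := by unfold Spec_count_uniform_universes; infer_instance

-- ===== CLAIM (what is proved, stated in full; the proofs are below) =====
def Claim_equal_count_uniform_universes : Prop := ∀ (M : Int) (N : Int) (universes : List (List Int)), Dom_count_uniform_universes M N universes → Spec_count_uniform_universes M N universes (count_uniform_universes M N universes)

-- ===== LEMMAS AND PROOFS =====

-- ---- the two compressions agree ----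

-- the rank dict built from enumerate looks up the index in the (nodup) list
lemma pvRankMap_getD (v : Int) :
    ∀ (l : List Int) (s : Int) (d : PySem.Dict Int Int), l.Nodup →
    ((PySem.List.enumerate l s).foldl (fun d p => d.insert p.2 p.1) d).getD v 0
      = if v ∈ l then s + (l.idxOf v : Int) else d.getD v 0 := by
  intro l
  induction l with
  | nil => intro s d _; simp [PySem.List.enumerate_nil]
  | cons a t ih =>
    intro s d hnd
    rw [PySem.List.enumerate_cons]
    simp only [List.foldl_cons]
    rw [ih (s + 1) (d.insert a s) (List.nodup_cons.mp hnd).2]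
    by_cases hvt : v ∈ t
    · have hva : v ≠ a := by rintro rfl; exact (List.nodup_cons.mp hnd).1 hvt
      simp only [if_true, List.mem_cons, hvt, or_true]
      rw [List.idxOf_cons_ne _ (by exact fun h => hva h.symm)]
      push_cast; ring
    · by_cases hva : v = a
      · subst hva
        simp only [hvt, if_false, List.mem_cons, true_or, if_true, List.idxOf_cons_self]
        rw [PySem.Dict.getD_insert]
        simp
      · simp only [hvt, if_false, List.mem_cons, hva, false_or, if_false]
        rw [PySem.Dict.getD_insert]
        simp [hva]

-- in a strictly increasing list, the index of v is the number of elements below v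
lemma pvIdxOf_eq_countP (v : Int) :
    ∀ (l : List Int), l.Pairwise (· < ·) → v ∈ l →
    (l.idxOf v : Int) = (l.countP (fun w => decide (w < v)) : Int) := by
  intro l
  induction l with
  | nil => intro _ h; simp at h
  | cons a t ih =>
    intro hp hv
    rcases List.mem_cons.mp hv with rfl | hvt
    · have h0 : t.countP (fun w => decide (w < v)) = 0 := by
        apply List.countP_eq_zero.mpr
        intro w hw
        have := (List.pairwise_cons.mp hp).1 w hw
        simp; omega
      simp [List.idxOf_cons_self, h0]
    · have hav : a < v := (List.pairwise_cons.mp hp).1 v hvt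
      have hva : v ≠ a := by omega
      rw [List.idxOf_cons_ne _ (by exact fun h => hva h.symm)]
      rw [List.countP_cons]
      have := ih (List.pairwise_cons.mp hp).2 hvt
      simp only [hav, decide_true]
      push_cast at this ⊢
      omega

lemma pvCompress_eq (uni : List Int) : pvCompressB uni = pvCompressA uni := by
  unfold pvCompressA pvCompressB
  apply List.map_congr_left
  intro v hv
  rw [PySem.List.foldl_ite_add_one]
  have hvset : v ∈ PySem.Set.ofList uni := (PySem.Set.mem_ofList _ _).mpr hv
  have hvsorted : v ∈ PySem.List.sorted (PySem.Set.ofList uni) (fun x => x) false :=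
    (PySem.List.mem_sorted _ _ _ _).mpr hvset
  rw [pvRankMap_getD v _ 0 PySem.Dict.empty
    ((PySem.List.sorted_perm _ _ _).nodup_iff.mpr (PySem.Set.nodup_ofList uni))]
  rw [if_pos hvsorted]
  rw [pvIdxOf_eq_countP v _ (PySem.List.sorted_ofList_pairwise_lt uni) hvsorted]
  rw [List.Perm.countP_eq _ (PySem.List.sorted_perm _ _ _)]

-- ---- A's total as a sum of C(count, 2) over the distinct compressed patterns ----

-- the summand A adds per distinct pattern: C(v, 2), guarded by 'if count > 1'
def pvG (v : Int) : Int := if v > 1 then PySem.Int.floordiv (v * (v - 1)) 2 else 0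

def pvAval (cs : List (List Int)) : Int :=
  ((PySem.Set.ofList cs).map (fun k => pvG ((cs.count k : Nat) : Int))).sum

-- B's fold (exactly the port's step function)
def pvBfold (universes : List (List Int)) : Int × List (List Int) :=
  universes.foldl
    (fun (s : Int × List (List Int)) u =>
      let c := pvCompressB u
      let r := s.2.foldl (fun (r : Int) p => if p = c then r + 1 else r) s.1
      (r, s.2 ++ [c]))
    ((0 : Int), ([] : List (List Int)))

lemma pvG_eq (m : Int) (hm : 0 ≤ m) : pvG m = m * (m - 1) / 2 := by
  unfold pvG
  split_ifs with h
  · rw [PySem.Int.floordiv_eq_ediv_of_pos (by norm_num)]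
  · have : m = 0 ∨ m = 1 := by omega
    rcases this with h0 | h1 <;> subst_vars <;> norm_num

lemma pvG_succ (m : Int) (hm : 0 ≤ m) : pvG (m + 1) = pvG m + m := by
  rw [pvG_eq (m + 1) (by omega), pvG_eq m hm]
  have h : (m + 1) * (m + 1 - 1) = m * (m - 1) + m * 2 := by ring
  rw [h, Int.add_mul_ediv_right _ _ (by norm_num)]

lemma pvSum_update {K : Type} [DecidableEq K] (c : K) (f f' : K → Int) :
    ∀ (l : List K), l.Nodup → c ∈ l → (∀ k ∈ l, k ≠ c → f' k = f k) →
    (l.map f').sum = (l.map f).sum + (f' c - f c) := by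
  intro l
  induction l with
  | nil => intro _ hc; simp at hc
  | cons a t ih =>
    intro hnd hc hag
    rcases List.mem_cons.mp hc with rfl | hct
    · have hnc : c ∉ t := (List.nodup_cons.mp hnd).1
      have : t.map f' = t.map f := by
        apply List.map_congr_left
        intro k hk
        exact hag k (List.mem_cons_of_mem _ hk) (fun h => hnc (h ▸ hk))
      simp [this]; ring
    · have hac : a ≠ c := by
        rintro rfl; exact (List.nodup_cons.mp hnd).1 hct
      have := ih (List.nodup_cons.mp hnd).2 hct
        (fun k hk hkc => hag k (List.mem_cons_of_mem _ hk) hkc)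
      simp [this, hag a (List.mem_cons_self) hac]; ring

-- A's result, rewritten as the sum pvAval
lemma pvA_eq_sum (cs : List (List Int)) :
    (PySem.Dict.counter cs).values.foldl
      (fun result count =>
        if count > 1 then result + PySem.Int.floordiv (count * (count - 1)) 2 else result) 0
    = pvAval cs := by
  have hstep : (fun (result count : Int) =>
      if count > 1 then result + PySem.Int.floordiv (count * (count - 1)) 2 else result)
      = fun result count => result + pvG count := by
    funext r v; unfold pvG; split_ifs <;> simp
  rw [hstep, PySem.List.foldl_add]
  have hv : (PySem.Dict.counter cs).values
      = (PySem.Set.ofList cs).map (fun k => ((cs.count k : Nat) : Int)) := by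
    simp only [PySem.Dict.values, PySem.Dict.items_counter, List.map_map]
    rfl
  rw [hv]
  simp [pvAval, List.map_map, Function.comp_def]

lemma pvAval_append (cs : List (List Int)) (c : List Int) :
    pvAval (cs ++ [c]) = pvAval cs + (cs.count c : Int) := by
  unfold pvAval
  rw [PySem.Set.ofList_append_singleton]
  by_cases hc : c ∈ cs
  · have hmem : c ∈ PySem.Set.ofList cs := by rw [PySem.Set.mem_ofList]; exact hc
    rw [PySem.Set.add_of_mem hmem]
    have hupd := pvSum_update c (fun k => pvG ((cs.count k : Nat) : Int))
      (fun k => pvG (((cs ++ [c]).count k : Nat) : Int))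
      (PySem.Set.ofList cs) (PySem.Set.nodup_ofList cs) hmem
      (by
        intro k hk hkc
        have hck : ¬ c = k := fun h => hkc h.symm
        have : (cs ++ [c]).count k = cs.count k := by
          simp [List.count_append, hck]
        simp only [this])
    rw [hupd]
    have h1 : (((cs ++ [c]).count c : Nat) : Int) = ((cs.count c : Nat) : Int) + 1 := by
      have : (cs ++ [c]).count c = cs.count c + 1 := by
        simp [List.count_append]
      rw [this]; push_cast; ring
    simp only [h1]
    rw [pvG_succ _ (by positivity)]
    ring
  · have hnmem : c ∉ PySem.Set.ofList cs := by rw [PySem.Set.mem_ofList]; exact hc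
    rw [PySem.Set.add_of_not_mem hnmem]
    have hmap : (PySem.Set.ofList cs).map (fun k => pvG (((cs ++ [c]).count k : Nat) : Int))
        = (PySem.Set.ofList cs).map (fun k => pvG ((cs.count k : Nat) : Int)) := by
      apply List.map_congr_left
      intro k hk
      have hkc : ¬ c = k := fun h => hnmem (h ▸ hk)
      have : (cs ++ [c]).count k = cs.count k := by
        simp [List.count_append, hkc]
      simp only [this]
    have hc0 : cs.count c = 0 := List.count_eq_zero.mpr hc
    have hcc : (cs ++ [c]).count c = 1 := by
      simp [List.count_append, hc0]
    rw [List.map_append, hmap]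
    simp [hc0, pvG]

-- ---- B's nested scan ----

-- the inner scan over 'seen' counts the occurrences of c
lemma pvInner (c : List Int) :
    ∀ (seen : List (List Int)) (r : Int),
    seen.foldl (fun (r : Int) p => if p = c then r + 1 else r) r = r + (seen.count c : Int) := by
  intro seen
  induction seen with
  | nil => intro r; simp
  | cons a t ih =>
    intro r
    simp only [List.foldl_cons, ih, List.count_cons]
    by_cases h : a = c
    · subst h; simp; ring
    · have hb : ¬ (a == c) = true := by simp [h]
      simp [h, hb]

-- the 'seen' list carried by B's fold is the compressed prefix
lemma pvB_snd (us : List (List Int)) :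
    ∀ (r : Int) (seen : List (List Int)),
    (us.foldl
      (fun (s : Int × List (List Int)) u =>
        let c := pvCompressB u
        let r := s.2.foldl (fun (r : Int) p => if p = c then r + 1 else r) s.1
        (r, s.2 ++ [c])) (r, seen)).2
    = seen ++ us.map pvCompressB := by
  induction us with
  | nil => intro r seen; simp
  | cons u t ih =>
    intro r seen
    simp only [List.foldl_cons, List.map_cons]
    rw [ih]
    simp

lemma pvB_fst_append (us : List (List Int)) (u : List Int) :
    (pvBfold (us ++ [u])).1
    = (pvBfold us).1 + ((us.map pvCompressB).count (pvCompressB u) : Int) := by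
  unfold pvBfold
  rw [List.foldl_append]
  simp only [List.foldl_cons, List.foldl_nil]
  rw [pvB_snd]
  simp [pvInner]

lemma pvMain (us : List (List Int)) : pvAval (us.map pvCompressA) = (pvBfold us).1 := by
  induction us using List.reverseRecOn with
  | nil => rfl
  | append_singleton t u ih =>
    rw [List.map_append, List.map_singleton, pvAval_append, pvB_fst_append, ih,
      pvCompress_eq]
    have : t.map pvCompressA = t.map pvCompressB := by
      apply List.map_congr_left; intro x _; rw [pvCompress_eq]
    rw [this]

-- ===== VERDICT (by name: the statement is the Claim_ definition above) =====
theorem count_uniform_universes_spec : Claim_equal_count_uniform_universes := by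
  intro M N universes _
  show count_uniform_universes M N universes = count_uniform_universes_alt M N universes
  have hA : count_uniform_universes M N universes = pvAval (universes.map pvCompressA) :=
    pvA_eq_sum (universes.map pvCompressA)
  have hB : count_uniform_universes_alt M N universes = (pvBfold universes).1 := rfl
  rw [hA, hB]
  exact pvMain universes
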